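-- pv_equiv track=rewrite | github.com/johnathansun/minimal_set | set.py | check
-- ===== SOURCE A (Python) =====
-- def check(card1, card2, card3):
--     for i in range(4):
--         if card1[i] == card2[i] == card3[i]:
--             continue
--         elif card1[i] != card2[i] and card1[i] != card3[i] and card2[i] != card3[i]:
--             continue
--         else:
--             return False
--     return True
-- ===== SOURCE B (Python) =====
-- def check(card1, card2, card3):
--     e12 = [x == y for x, y in zip(card1, card2)]
--     e13 = [x == y for x, y in zip(card1, card3)]
--     e23 = [x == y for x, y in zip(card2, card3)]
--     return e12[:4] == e13[:4] == e23[:4]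
-- ===== Notes on version B (the rewrite author's own statement) =====
-- stated objective: alternative
-- what changed: Instead of branching per position, B builds three pairwise-equality bit vectors (card1-vs-card2, card1-vs-card3, card2-vs-card3) in staged passes and returns whether their first-four-element slices are all equal: a position is valid exactly when its three pairwise-equality bits coincide (all True = all same, all False = all distinct).
-- outside the precondition, e.g. on check([1, 1], [1, 1], [1, 1]): A raises IndexError, B returns True
import Mathlib
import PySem

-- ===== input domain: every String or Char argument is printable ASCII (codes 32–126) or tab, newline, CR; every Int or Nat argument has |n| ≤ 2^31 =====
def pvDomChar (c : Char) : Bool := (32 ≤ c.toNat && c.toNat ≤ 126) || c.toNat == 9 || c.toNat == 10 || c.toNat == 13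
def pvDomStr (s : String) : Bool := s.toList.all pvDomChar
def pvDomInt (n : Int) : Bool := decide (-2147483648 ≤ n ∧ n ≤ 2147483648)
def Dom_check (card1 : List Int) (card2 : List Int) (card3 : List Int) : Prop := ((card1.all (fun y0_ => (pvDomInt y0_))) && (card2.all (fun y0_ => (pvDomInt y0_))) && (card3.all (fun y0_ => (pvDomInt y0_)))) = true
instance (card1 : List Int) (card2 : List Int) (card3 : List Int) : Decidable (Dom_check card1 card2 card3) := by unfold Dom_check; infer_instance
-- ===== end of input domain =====

-- B replaces A's per-position branch chain by three staged pairwise-equality passes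
-- (bit vectors zip(card1,card2), zip(card1,card3), zip(card2,card3)) compared as lists (alternative; same cost).

-- ===== PORT A =====
-- indexing is exact under Pre_check (every index the loop reaches is in range); pyGetD's default is never used there
def checkLoop (card1 : List Int) (card2 : List Int) (card3 : List Int) : List Int → Bool
  | [] => true
  | i :: rest =>
    if PySem.List.pyGetD card1 i 0 = PySem.List.pyGetD card2 i 0 ∧
       PySem.List.pyGetD card2 i 0 = PySem.List.pyGetD card3 i 0 then
      checkLoop card1 card2 card3 rest
    else if PySem.List.pyGetD card1 i 0 ≠ PySem.List.pyGetD card2 i 0 ∧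
            PySem.List.pyGetD card1 i 0 ≠ PySem.List.pyGetD card3 i 0 ∧
            PySem.List.pyGetD card2 i 0 ≠ PySem.List.pyGetD card3 i 0 then
      checkLoop card1 card2 card3 rest
    else false

def check (card1 : List Int) (card2 : List Int) (card3 : List Int) : Bool :=
  checkLoop card1 card2 card3 (PySem.List.pyRange 0 4 1)

-- ===== PORT B =====
def check_alt (card1 : List Int) (card2 : List Int) (card3 : List Int) : Bool :=
  let e12 := (card1.zip card2).map (fun p => decide (p.1 = p.2))
  let e13 := (card1.zip card3).map (fun p => decide (p.1 = p.2))
  let e23 := (card2.zip card3).map (fun p => decide (p.1 = p.2))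
  decide (PySem.List.slice e12 none (some 4) = PySem.List.slice e13 none (some 4)) &&
  decide (PySem.List.slice e13 none (some 4) = PySem.List.slice e23 none (some 4))

-- ===== PRECONDITION & SPEC =====
-- Pre_: A returns iff all lengths are ≥ 4, or some in-range position among 0..3 is invalid
-- (making the loop return False before indexing past a list's end); otherwise A raises IndexError.
def Pre_check (card1 : List Int) (card2 : List Int) (card3 : List Int) : Prop :=
  (4 ≤ card1.length ∧ 4 ≤ card2.length ∧ 4 ≤ card3.length) ∨
  (∃ i < 4, i < card1.length ∧ i < card2.length ∧ i < card3.length ∧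
    ¬ (card1.getD i 0 = card2.getD i 0 ∧ card2.getD i 0 = card3.getD i 0) ∧
    (card1.getD i 0 = card2.getD i 0 ∨ card1.getD i 0 = card3.getD i 0 ∨
     card2.getD i 0 = card3.getD i 0))
instance (card1 : List Int) (card2 : List Int) (card3 : List Int) : Decidable (Pre_check card1 card2 card3) := by unfold Pre_check; infer_instance

def pvWitness_check : List Int × List Int × List Int := ([0, 1, 2, 0], [0, 1, 0, 1], [0, 1, 1, 2])

def Spec_check (card1 : List Int) (card2 : List Int) (card3 : List Int) (out : Bool) : Prop := out = check_alt card1 card2 card3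
instance (card1 : List Int) (card2 : List Int) (card3 : List Int) (out : Bool) : Decidable (Spec_check card1 card2 card3 out) := by unfold Spec_check; infer_instance

-- ===== CLAIM =====
def Claim_equal_check : Prop := ∀ (card1 : List Int) (card2 : List Int) (card3 : List Int), Dom_check card1 card2 card3 → Pre_check card1 card2 card3 → Spec_check card1 card2 card3 (check card1 card2 card3)

-- ===== LEMMAS AND PROOFS =====

-- a position is valid (A's two "continue" branches) iff its three pairwise-equality bits coincide
theorem point (a b c : Int) :
    (if a = b ∧ b = c then true
     else if a ≠ b ∧ a ≠ c ∧ b ≠ c then true else false)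
      = (decide (a = b) = decide (a = c) ∧ decide (a = c) = decide (b = c) : Bool) := by
  by_cases hab : a = b <;> by_cases hac : a = c <;> by_cases hbc : b = c <;> simp_all

theorem loop_eq_all (card1 card2 card3 : List Int) (L : List Int) :
    checkLoop card1 card2 card3 L
      = L.all (fun i =>
          (decide (PySem.List.pyGetD card1 i 0 = PySem.List.pyGetD card2 i 0)
             = decide (PySem.List.pyGetD card1 i 0 = PySem.List.pyGetD card3 i 0) ∧
           decide (PySem.List.pyGetD card1 i 0 = PySem.List.pyGetD card3 i 0)
             = decide (PySem.List.pyGetD card2 i 0 = PySem.List.pyGetD card3 i 0) : Bool)) := by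
  induction L with
  | nil => rfl
  | cons i rest ih =>
    rw [List.all_cons, ← ih, checkLoop, ← point]
    split_ifs <;> simp_all

theorem slice4 (xs : List Bool) : PySem.List.slice xs none (some 4) = xs.take 4 := by
  have h := PySem.List.slice_to (xs := xs) (b := (4:Int)) (by omega)
  simpa using h

theorem getD1 (x0 x1 x2 x3 : Int) (t : List Int) (d : Int) :
    PySem.List.pyGetD (x0 :: x1 :: x2 :: x3 :: t) (1:Int) d = x1 := by
  rw [show (1:Int) = ((1:Nat):Int) from rfl, PySem.List.pyGetD_natCast]; rfl

theorem getD2 (x0 x1 x2 x3 : Int) (t : List Int) (d : Int) :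
    PySem.List.pyGetD (x0 :: x1 :: x2 :: x3 :: t) (2:Int) d = x2 := by
  rw [show (2:Int) = ((2:Nat):Int) from rfl, PySem.List.pyGetD_natCast]; rfl

theorem getD3 (x0 x1 x2 x3 : Int) (t : List Int) (d : Int) :
    PySem.List.pyGetD (x0 :: x1 :: x2 :: x3 :: t) (3:Int) d = x3 := by
  rw [show (3:Int) = ((3:Nat):Int) from rfl, PySem.List.pyGetD_natCast]; rfl

theorem long_case (card1 card2 card3 : List Int)
    (h1 : 4 ≤ card1.length) (h2 : 4 ≤ card2.length) (h3 : 4 ≤ card3.length) :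
    check card1 card2 card3 = check_alt card1 card2 card3 := by
  obtain ⟨a0, a1, a2, a3, t1, rfl⟩ : ∃ a0 a1 a2 a3 t, card1 = a0 :: a1 :: a2 :: a3 :: t := by
    match card1, h1 with
    | a0 :: a1 :: a2 :: a3 :: t, _ => exact ⟨a0, a1, a2, a3, t, rfl⟩
  obtain ⟨b0, b1, b2, b3, t2, rfl⟩ : ∃ b0 b1 b2 b3 t, card2 = b0 :: b1 :: b2 :: b3 :: t := by
    match card2, h2 with
    | b0 :: b1 :: b2 :: b3 :: t, _ => exact ⟨b0, b1, b2, b3, t, rfl⟩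
  obtain ⟨c0, c1, c2, c3, t3, rfl⟩ : ∃ c0 c1 c2 c3 t, card3 = c0 :: c1 :: c2 :: c3 :: t := by
    match card3, h3 with
    | c0 :: c1 :: c2 :: c3 :: t, _ => exact ⟨c0, c1, c2, c3, t, rfl⟩
  rw [check, loop_eq_all, check_alt]
  simp only [slice4]
  simp [PySem.List.pyRange, List.range_succ, List.zip_cons_cons,
    getD1, getD2, getD3]
  ac_rfl

theorem pairBit (l1 l2 : List Int) (i : Nat) (hi4 : i < 4)
    (h1 : i < l1.length) (h2 : i < l2.length) :
    (List.take 4 ((l1.zip l2).map fun p => decide (p.1 = p.2)))[i]?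
      = some (decide (l1.getD i 0 = l2.getD i 0)) := by
  have hz : i < (l1.zip l2).length := by simp [List.length_zip]; omega
  rw [List.getElem?_take_of_lt hi4, List.getElem?_map, List.getElem?_eq_getElem hz,
    List.getElem_zip]
  simp [h1, h2]

theorem short_case (card1 card2 card3 : List Int) (i : Nat) (hi4 : i < 4)
    (h1 : i < card1.length) (h2 : i < card2.length) (h3 : i < card3.length)
    (hne : ¬ (card1.getD i 0 = card2.getD i 0 ∧ card2.getD i 0 = card3.getD i 0))
    (hsome : card1.getD i 0 = card2.getD i 0 ∨ card1.getD i 0 = card3.getD i 0 ∨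
             card2.getD i 0 = card3.getD i 0) :
    check card1 card2 card3 = false ∧ check_alt card1 card2 card3 = false := by
  set a := card1.getD i 0 with ha
  set b := card2.getD i 0 with hb
  set c := card3.getD i 0 with hc
  have key : ¬ (decide (a = b) = decide (a = c) ∧ decide (a = c) = decide (b = c)) := by
    by_cases hab : a = b <;> by_cases hac : a = c <;> by_cases hbc : b = c <;> simp_all
  constructor
  · rw [check, loop_eq_all]
    apply List.all_eq_false.mpr
    refine ⟨(i : Int), ?_, ?_⟩
    · have hr : PySem.List.pyRange 0 4 1 = [0, 1, 2, 3] := by decide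
      rw [hr]
      interval_cases i <;> simp
    · simp only [PySem.List.pyGetD_natCast, ← ha, ← hb, ← hc]
      simpa using key
  · rw [check_alt]
    simp only [slice4]
    refine Bool.eq_false_iff.mpr ?_
    intro htrue
    rw [Bool.and_eq_true, decide_eq_true_iff, decide_eq_true_iff] at htrue
    obtain ⟨hA, hB⟩ := htrue
    have g12 := pairBit card1 card2 i hi4 h1 h2
    have g13 := pairBit card1 card3 i hi4 h1 h3
    have g23 := pairBit card2 card3 i hi4 h2 h3
    rw [hA] at g12
    rw [hB] at g13
    have e1 := Option.some.inj (g12.symm.trans (pairBit card1 card3 i hi4 h1 h3))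
    have e2 := Option.some.inj (g13.symm.trans g23)
    rw [ha, hb, hc] at key
    exact key ⟨e1, e2⟩

theorem check_spec : Claim_equal_check := by
  intro card1 card2 card3 _ hpre
  unfold Spec_check
  rcases hpre with ⟨h1, h2, h3⟩ | ⟨i, hi4, h1, h2, h3, hne, hsome⟩
  · exact long_case card1 card2 card3 h1 h2 h3
  · obtain ⟨ha, hb⟩ := short_case card1 card2 card3 i hi4 h1 h2 h3 hne hsome
    rw [ha, hb]
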